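-- pv_equiv track=rewrite | github.com/h1s97x/Cryptogrphy | Hash/HMAC_MD5.py | filter_space
-- ===== SOURCE A (Python) =====
-- def filter_space(string):
--     string = string.replace(" ", "")
--     new_str = ''
--     for i in range(len(string)):
--         if i % 8 == 0 and i != 0:
--             new_str = new_str + ' ' + string[i]
--         else:
--             new_str = new_str + string[i]
--     return new_str
-- ===== SOURCE B (Python) =====
-- def filter_space(string):
--     string = string.replace(" ", "")
--     chunks = []
--     while string:
--         chunks.append(string[:8])
--         string = string[8:]
--     return ' '.join(chunks)
-- ===== Notes on version B (the rewrite author's own statement) =====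
-- stated objective: faster
-- what changed: B slices the cleaned string into whole 8-character blocks and joins them with single-space separators, replacing A's per-character indexed loop that grows the result by repeated string concatenation with a modulo test.
import Mathlib
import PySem

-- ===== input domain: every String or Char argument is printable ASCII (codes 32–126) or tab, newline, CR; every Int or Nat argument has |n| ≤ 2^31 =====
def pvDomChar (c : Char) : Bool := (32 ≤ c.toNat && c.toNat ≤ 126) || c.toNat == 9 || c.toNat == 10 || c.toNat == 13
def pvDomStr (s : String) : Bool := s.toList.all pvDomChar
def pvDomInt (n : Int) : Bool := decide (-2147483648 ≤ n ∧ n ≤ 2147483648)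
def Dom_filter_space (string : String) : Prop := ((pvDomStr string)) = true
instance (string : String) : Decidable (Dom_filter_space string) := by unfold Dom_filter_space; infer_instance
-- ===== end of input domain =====

-- B chunks the de-spaced string into 8-character slices and joins them with ' ',
-- instead of A's per-character loop with a modulo test; return values are proved equal.

-- ===== PORT A =====
def filter_space (string : String) : String :=
  String.mk ((PySem.List.enumerate (PySem.Str.replace string " " "").toList 0).foldl
    (fun acc ic => if ic.1 % 8 == 0 && ic.1 != 0 then acc ++ [' ', ic.2] else acc ++ [ic.2]) [])
    -- i % 8: enumerate indices are ≥ 0 and the divisor 8 is positive, where Lean's Int % agrees with Python's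

-- ===== PORT B =====
-- the while loop of Source B: peel off string[:8] while the string is nonempty
def chunksB (l : List Char) : List (List Char) :=
  if l.isEmpty then [] else l.take 8 :: chunksB (l.drop 8)
termination_by l.length
decreasing_by
  cases l with
  | nil => simp_all
  | cons c t => simp [List.length_drop]

def filter_space_alt (string : String) : String :=
  String.mk (List.intercalate [' '] (chunksB (PySem.Str.replace string " " "").toList))

-- ===== PRECONDITION & SPEC =====
def Spec_filter_space (string : String) (out : String) : Prop := out = filter_space_alt string
instance (string : String) (out : String) : Decidable (Spec_filter_space string out) := by unfold Spec_filter_space; infer_instance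

-- ===== CLAIM (what is proved, stated in full; the proofs are below) =====
def Claim_equal_filter_space : Prop := ∀ (string : String), Dom_filter_space string → Spec_filter_space string (filter_space string)

-- ===== LEMMAS AND PROOFS =====

-- A's loop, written as recursion producing the suffix of the output from absolute index i on
def goA : Int → List Char → List Char
  | _, [] => []
  | i, c :: t => (if i % 8 == 0 && i != 0 then [' ', c] else [c]) ++ goA (i+1) t

lemma foldl_eq_goA (t : List Char) : ∀ (i : Int) (acc : List Char),
    (PySem.List.enumerate t i).foldl
      (fun acc ic => if ic.1 % 8 == 0 && ic.1 != 0 then acc ++ [' ', ic.2] else acc ++ [ic.2]) acc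
      = acc ++ goA i t := by
  induction t with
  | nil => intro i acc; simp [PySem.List.enumerate_nil, goA]
  | cons c t ih =>
    intro i acc
    rw [PySem.List.enumerate_cons]
    simp only [List.foldl_cons, ih, goA]
    split <;> simp

-- the same suffix, indexed instead by how many characters remain in the current block
def go2 : Nat → List Char → List Char
  | _, [] => []
  | 0, c :: t => ' ' :: c :: go2 7 t
  | j+1, c :: t => c :: go2 j t

lemma goA_eq_go2 (t : List Char) : ∀ (i : Int), 1 ≤ i →
    goA i t = go2 ((8 - i % 8) % 8).toNat t := by
  induction t with
  | nil => intro i _; simp [goA, go2]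
  | cons c t ih =>
    intro i hi
    by_cases h : i % 8 = 0
    · have h0 : ((8 - i % 8) % 8).toNat = 0 := by omega
      have h1 : ((8 - (i+1) % 8) % 8).toNat = 7 := by omega
      simp only [goA, h0, go2]
      have hc : (i % 8 == 0 && i != 0) = true := by
        simp [h]; omega
      rw [hc, ih (i+1) (by omega), h1]
      simp
    · have hj : ∃ j : Nat, ((8 - i % 8) % 8).toNat = j + 1 := by
        refine ⟨((8 - i % 8) % 8).toNat - 1, by omega⟩
      obtain ⟨j, hjeq⟩ := hj
      have h1 : ((8 - (i+1) % 8) % 8).toNat = j := by omega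
      have hc : (i % 8 == 0 && i != 0) = false := by simp [h]
      simp only [goA, hjeq, go2]
      rw [hc, ih (i+1) (by omega), h1]
      simp

-- abbreviation for B's join
def JB (l : List Char) : List Char := List.intercalate [' '] (chunksB l)

lemma intercalate_space_cons (a : List Char) (r : List (List Char)) :
    List.intercalate [' '] (a :: r)
      = a ++ (if r = [] then [] else ' ' :: List.intercalate [' '] r) := by
  cases r with
  | nil => simp [List.intercalate]
  | cons b r' => simp [List.intercalate, List.intersperse]

lemma chunksB_eq_nil_iff (l : List Char) : chunksB l = [] ↔ l = [] := by
  rw [chunksB]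
  cases l <;> simp

lemma JB_unfold (l : List Char) (h : l ≠ []) :
    JB l = l.take 8 ++ (if l.drop 8 = [] then [] else ' ' :: JB (l.drop 8)) := by
  unfold JB
  rw [chunksB]
  simp only [List.isEmpty_iff, h, ite_false]
  rw [intercalate_space_cons]
  simp only [chunksB_eq_nil_iff]

lemma go2_eq_JB (t : List Char) : ∀ (j : Nat),
    go2 j t = t.take j ++ (if t.drop j = [] then [] else ' ' :: JB (t.drop j)) := by
  induction t with
  | nil => intro j; simp [go2]
  | cons c t ih =>
    intro j
    cases j with
    | zero =>
      simp only [go2, List.take_zero, List.drop_zero, List.nil_append]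
      rw [if_neg (by simp), JB_unfold (c :: t) (by simp)]
      simp only [List.take_succ_cons, List.drop_succ_cons]
      rw [ih 7]
      simp
    | succ j =>
      simp only [go2, List.take_succ_cons, List.drop_succ_cons, List.cons_append]
      rw [ih j]

lemma goA_zero_eq_JB (l : List Char) : goA 0 l = JB l := by
  cases l with
  | nil => simp [goA, JB, chunksB, List.intercalate]
  | cons c t =>
    simp only [goA]
    have : ((8 - (0+1 : Int) % 8) % 8).toNat = 7 := by decide
    rw [goA_eq_go2 t (0+1) (by omega), this, go2_eq_JB t 7,
        JB_unfold (c :: t) (by simp)]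
    simp

-- ===== VERDICT (by name: the statement is the Claim_ definition above) =====
theorem filter_space_spec : Claim_equal_filter_space := by
  intro string _
  unfold Spec_filter_space filter_space filter_space_alt
  rw [foldl_eq_goA, goA_zero_eq_JB]
  rfl
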